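-- pv_equiv track=rewrite | github.com/netra-systems/zen | tests/compliance/execution_engine_ssot/test_execution_engine_enforcement.py | _build_execution_engine_dependency_graph
-- ===== SOURCE A (Python) =====
-- from typing import Dict, List, Set, Type
--
-- def _build_execution_engine_dependency_graph(engines: Dict) -> Dict[str, List[str]]:
--     """Build dependency graph for execution engines."""
--     graph = {}
--
--     for engine_name, engine_info in engines.items():
--         content = engine_info.get('source_content', '')
--         dependencies = []
--
--         # Find imports of other execution engines
--         for other_engine in engines.keys():
--             if other_engine != engine_name and other_engine in content:
--                 dependencies.append(other_engine)
--
--         graph[engine_name] = dependencies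
--
--     return graph
-- ===== SOURCE B (Python) =====
-- def _build_execution_engine_dependency_graph(engines):
--     """Build dependency graph for execution engines (multi-pattern scan:
--     bucket names by first character, scan each content once position by
--     position collecting the names that start there, then emit in key order)."""
--     names = list(engines)
--     buckets = {}
--     for n in names:
--         if n:
--             buckets.setdefault(n[0], []).append(n)
--     empties = [n for n in names if not n]
--     graph = {}
--     for name, info in engines.items():
--         content = info.get('source_content', '')
--         found = set(empties)
--         for j, ch in enumerate(content):
--             for cand in buckets.get(ch, []):
--                 if content.startswith(cand, j):
--                     found.add(cand)
--         graph[name] = [n for n in names if n != name and n in found]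
--     return graph
-- ===== Notes on version B (the rewrite author's own statement) =====
-- stated objective: alternative
-- what changed: B replaces A's per-name library substring test with a multi-pattern scan: it buckets the engine names by first character once, scans each content a single time position by position collecting into a set the names that start at each position, then rebuilds the dependency list by filtering the key list against that set.
import Mathlib
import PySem

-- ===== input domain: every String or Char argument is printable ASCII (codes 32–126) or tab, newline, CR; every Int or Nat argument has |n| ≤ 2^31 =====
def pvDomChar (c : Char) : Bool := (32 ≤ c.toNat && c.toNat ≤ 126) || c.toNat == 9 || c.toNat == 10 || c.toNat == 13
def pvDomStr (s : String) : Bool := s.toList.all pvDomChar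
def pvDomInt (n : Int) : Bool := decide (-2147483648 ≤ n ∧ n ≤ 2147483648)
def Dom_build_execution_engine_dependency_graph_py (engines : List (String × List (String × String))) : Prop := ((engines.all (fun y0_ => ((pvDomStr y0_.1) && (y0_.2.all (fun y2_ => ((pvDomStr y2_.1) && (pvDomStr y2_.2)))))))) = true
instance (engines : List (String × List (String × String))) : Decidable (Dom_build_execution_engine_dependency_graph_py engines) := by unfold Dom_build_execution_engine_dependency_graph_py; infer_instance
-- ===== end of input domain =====

-- B replaces A's per-name substring test with a multi-pattern scan: names are bucketed by
-- first character, each content is scanned once position by position collecting the names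
-- that start there into a set, and the dependency list is restored in key order
-- (objective: alternative; same results by a different algorithm).

-- info.get('source_content', '') — shared helper, literally the same expression in both sources
def pvContent (info : List (String × String)) : String :=
  (PySem.Dict.ofList info).getD "source_content" ""

-- ===== PORT A =====
def build_execution_engine_dependency_graph_py (engines : List (String × List (String × String))) : List (String × List String) :=
  let d := PySem.Dict.ofList engines
  (d.items.foldl
    (fun graph p =>
      graph.insert p.1
        (d.keys.foldl
          (fun deps other =>
            if (other != p.1 && PySem.Str.isIn other (pvContent p.2)) then deps ++ [other]
            else deps)
          []))
    PySem.Dict.empty).items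

-- ===== PORT B =====
def build_execution_engine_dependency_graph_py_alt (engines : List (String × List (String × String))) : List (String × List String) :=
  let d := PySem.Dict.ofList engines
  let names := d.keys
  -- for n in names: if n: buckets.setdefault(n[0], []).append(n)
  let buckets := names.foldl
    (fun bf n =>
      match n.toList with
      | [] => bf
      | c :: _ => bf.modify c [] (· ++ [n]))
    (PySem.Dict.empty : PySem.Dict Char (List String))
  let empties := names.filter (fun n => n == "")
  (d.items.foldl
    (fun graph p =>
      let content := pvContent p.2
      let found := (PySem.List.enumerate content.toList 0).foldl
        (fun found q =>
          (buckets.getD q.2 []).foldl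
            (fun found cand =>
              -- content.startswith(cand, j): exact as startswith on the j-suffix (j = q.1 ≥ 0 here)
              if PySem.Chars.startswith (content.toList.drop q.1.toNat) cand.toList then
                PySem.Set.add found cand
              else found)
            found)
        (PySem.Set.ofList empties)
      graph.insert p.1 (names.filter (fun n => n != p.1 && PySem.Set.contains found n)))
    PySem.Dict.empty).items

-- ===== PRECONDITION & SPEC =====
def Spec_build_execution_engine_dependency_graph_py (engines : List (String × List (String × String))) (out : List (String × List String)) : Prop := out = build_execution_engine_dependency_graph_py_alt engines
instance (engines : List (String × List (String × String))) (out : List (String × List String)) : Decidable (Spec_build_execution_engine_dependency_graph_py engines out) := by unfold Spec_build_execution_engine_dependency_graph_py; infer_instance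

-- ===== CLAIM =====
def Claim_equal_build_execution_engine_dependency_graph_py : Prop := ∀ (engines : List (String × List (String × String))), Dom_build_execution_engine_dependency_graph_py engines → Spec_build_execution_engine_dependency_graph_py engines (build_execution_engine_dependency_graph_py engines)

-- ===== LEMMAS AND PROOFS =====

-- B's innermost loop (candidates of one bucket at one position): set membership afterwards
lemma pv_inner_mem (L : List String) (cs : List Char) (j : Nat) (s : PySem.Set String) (x : String) :
    x ∈ L.foldl
      (fun s cand =>
        if PySem.Chars.startswith (cs.drop j) cand.toList then PySem.Set.add s cand else s) s
    ↔ x ∈ s ∨ (x ∈ L ∧ PySem.Chars.startswith (cs.drop j) x.toList = true) := by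
  induction L generalizing s with
  | nil => simp
  | cons cand L ih =>
    simp only [List.foldl_cons]
    by_cases hc : PySem.Chars.startswith (cs.drop j) cand.toList = true
    · rw [if_pos hc, ih]
      simp only [PySem.Set.mem_add, List.mem_cons]
      constructor
      · rintro ((h | rfl) | h)
        · exact Or.inl h
        · exact Or.inr ⟨Or.inl rfl, hc⟩
        · exact Or.inr ⟨Or.inr h.1, h.2⟩
      · rintro (h | ⟨(rfl | h), hx⟩)
        · exact Or.inl (Or.inl h)
        · exact Or.inl (Or.inr rfl)
        · exact Or.inr ⟨h, hx⟩
    · rw [if_neg hc, ih]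
      simp only [List.mem_cons]
      constructor
      · rintro (h | h)
        · exact Or.inl h
        · exact Or.inr ⟨Or.inr h.1, h.2⟩
      · rintro (h | ⟨(rfl | h), hx⟩)
        · exact Or.inl h
        · exact absurd hx hc
        · exact Or.inr ⟨h, hx⟩

-- B's scan over the enumerated content: set membership afterwards
lemma pv_scan_mem (E : List (Int × Char)) (bf : PySem.Dict Char (List String)) (cs : List Char)
    (s : PySem.Set String) (x : String) :
    x ∈ E.foldl
      (fun s q =>
        (bf.getD q.2 []).foldl
          (fun s cand =>
            if PySem.Chars.startswith (cs.drop q.1.toNat) cand.toList then PySem.Set.add s cand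
            else s) s) s
    ↔ x ∈ s ∨ ∃ q ∈ E, x ∈ bf.getD q.2 [] ∧
        PySem.Chars.startswith (cs.drop q.1.toNat) x.toList = true := by
  induction E generalizing s with
  | nil => simp
  | cons q E ih =>
    simp only [List.foldl_cons]
    rw [ih]
    rw [pv_inner_mem]
    simp only [List.mem_cons]
    constructor
    · rintro ((h | h) | ⟨r, hr, h⟩)
      · exact Or.inl h
      · exact Or.inr ⟨q, Or.inl rfl, h⟩
      · exact Or.inr ⟨r, Or.inr hr, h⟩
    · rintro (h | ⟨r, (rfl | hr), h⟩)
      · exact Or.inl (Or.inl h)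
      · exact Or.inl (Or.inr h)
      · exact Or.inr ⟨r, hr, h⟩

-- the first-character buckets: membership in one bucket's list
lemma pv_bucket_mem (names : List String) (bf : PySem.Dict Char (List String)) (c : Char) (x : String) :
    x ∈ (names.foldl
      (fun bf n =>
        match n.toList with
        | [] => bf
        | c :: _ => bf.modify c [] (· ++ [n])) bf).getD c []
    ↔ x ∈ bf.getD c [] ∨ (x ∈ names ∧ x.toList.head? = some c) := by
  induction names generalizing bf with
  | nil => simp
  | cons n names ih =>
    simp only [List.foldl_cons]
    cases hn : n.toList with
    | nil =>
      rw [ih]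
      simp only [List.mem_cons]
      constructor
      · rintro (h | ⟨h1, h2⟩)
        · exact Or.inl h
        · exact Or.inr ⟨Or.inr h1, h2⟩
      · rintro (h | ⟨(rfl | h1), h2⟩)
        · exact Or.inl h
        · rw [hn] at h2; cases h2
        · exact Or.inr ⟨h1, h2⟩
    | cons c' t =>
      rw [ih, PySem.Dict.getD_modify]
      by_cases hcc : c = c'
      · subst hcc
        rw [if_pos rfl]
        simp only [List.mem_append, List.mem_cons, List.not_mem_nil, or_false]
        constructor
        · rintro ((h | rfl) | ⟨h1, h2⟩)
          · exact Or.inl h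
          · exact Or.inr ⟨Or.inl rfl, by rw [hn]; rfl⟩
          · exact Or.inr ⟨Or.inr h1, h2⟩
        · rintro (h | ⟨(rfl | h1), h2⟩)
          · exact Or.inl (Or.inl h)
          · exact Or.inl (Or.inr rfl)
          · exact Or.inr ⟨h1, h2⟩
      · rw [if_neg hcc]
        simp only [List.mem_cons]
        constructor
        · rintro (h | ⟨h1, h2⟩)
          · exact Or.inl h
          · exact Or.inr ⟨Or.inr h1, h2⟩
        · rintro (h | ⟨(rfl | h1), h2⟩)
          · exact Or.inl h
          · rw [hn] at h2
            exact absurd (Option.some_injective _ h2.symm) hcc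
          · exact Or.inr ⟨h1, h2⟩

-- the set B collects for one content holds exactly the names occurring in it
lemma pv_found_iff (names : List String) (cs : List Char) (x : String) (hx : x ∈ names) :
    x ∈ (PySem.List.enumerate cs 0).foldl
      (fun s q =>
        ((names.foldl
            (fun bf n =>
              match n.toList with
              | [] => bf
              | c :: _ => bf.modify c [] (· ++ [n]))
            (PySem.Dict.empty : PySem.Dict Char (List String))).getD q.2 []).foldl
          (fun s cand =>
            if PySem.Chars.startswith (cs.drop q.1.toNat) cand.toList then PySem.Set.add s cand
            else s) s)
      (PySem.Set.ofList (names.filter (fun n => n == "")))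
    ↔ PySem.Chars.isIn x.toList cs = true := by
  rw [pv_scan_mem]
  simp only [PySem.Set.mem_ofList, List.mem_filter]
  cases hxl : x.toList with
  | nil =>
    have hxe : x = "" := by
      have := congrArg String.ofList hxl
      simpa using this
    subst hxe
    simp only [PySem.Chars.isIn_nil]
    constructor
    · intro _; trivial
    · intro _; exact Or.inl ⟨hx, rfl⟩
  | cons c t =>
    have hxne : (x == "") = false := by
      cases h : x == "" with
      | true =>
        have : x = "" := by simpa using h
        rw [this] at hxl; cases hxl
      | false => rfl
    constructor
    · rintro (⟨_, he⟩ | ⟨q, hq, hb, hsw⟩)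
      · rw [hxne] at he; cases he
      · rw [← PySem.Chars.exists_prefix_drop_iff_isIn]
        exact ⟨q.1.toNat, (PySem.Chars.startswith_iff _ _).mp hsw⟩
    · intro hin
      obtain ⟨j, hpre⟩ := (PySem.Chars.exists_prefix_drop_iff_isIn _ _).mpr hin
      obtain ⟨r, hr⟩ := hpre
      have hj : j < cs.length := by
        by_contra hge
        rw [List.drop_eq_nil_of_le (Nat.le_of_not_lt hge)] at hr
        cases hr
      have hcj : cs[j] = c := by
        have h0 : (cs.drop j)[0]? = some c := by rw [← hr]; rfl
        rw [List.getElem?_drop] at h0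
        simpa [List.getElem?_eq_getElem hj] using h0
      refine Or.inr ⟨((0 : Int) + (j : Int), cs[j]), ?_, ?_, ?_⟩
      · exact (PySem.List.mem_enumerate_iff _ _ _).mpr ⟨j, hj, rfl⟩
      · rw [pv_bucket_mem]
        refine Or.inr ⟨hx, ?_⟩
        simp [hxl, hcj]
      · have hnt : ((0 : Int) + (j : Int)).toNat = j := by omega
        rw [hnt]
        exact (PySem.Chars.startswith_iff _ _).mpr ⟨r, hr⟩

-- ===== VERDICT =====
theorem build_execution_engine_dependency_graph_py_spec : Claim_equal_build_execution_engine_dependency_graph_py := by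
  intro engines _
  unfold Spec_build_execution_engine_dependency_graph_py
  simp only [build_execution_engine_dependency_graph_py,
    build_execution_engine_dependency_graph_py_alt]
  set L := (PySem.Dict.ofList engines).items with hLdef
  have hnd : (L.map Prod.fst).Nodup := PySem.Dict.nodup_keys_ofList engines
  have hkeys : (PySem.Dict.ofList engines).keys = L.map Prod.fst := rfl
  rw [PySem.Dict.items_foldl_insert_fresh L Prod.fst _ _ (by intro a _; rfl) hnd,
      PySem.Dict.items_foldl_insert_fresh L Prod.fst _ _ (by intro a _; rfl) hnd]
  simp only [PySem.Dict.empty, List.nil_append]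
  refine List.map_congr_left ?_
  intro p _
  refine Prod.ext rfl ?_
  rw [hkeys]
  have hfi := PySem.List.foldl_append_if
    (fun other => other != p.1 && PySem.Str.isIn other (pvContent p.2)) (id : String → String)
    (L.map Prod.fst) []
  simp only [id, List.map_id, List.nil_append] at hfi
  rw [hfi]
  refine List.filter_congr ?_
  intro n hn
  have hiff := pv_found_iff (L.map Prod.fst) (pvContent p.2).toList n hn
  simp only [PySem.Dict.empty] at hiff
  rw [Bool.eq_iff_iff]
  simp only [Bool.and_eq_true, bne_iff_ne, PySem.Str.isIn_eq, PySem.Set.contains_iff]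
  exact ⟨fun ⟨h1, h2⟩ => ⟨h1, hiff.mpr h2⟩, fun ⟨h1, h2⟩ => ⟨h1, hiff.mp h2⟩⟩
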